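-- pv_equiv track=rewrite | github.com/Terbeche/competitive-programming | Python/CodeForces/A_Magic_Numbers.py | magic_number
-- ===== SOURCE A (Python) =====
-- def magic_number(number):
--     possibilities = ["144", "14", "1"]
--     i = 0
--     while i < len(number):
--         flag = False
--         for possibility in possibilities:
--             if number[i:i+len(possibility)] == possibility:
--                 i += len(possibility)
--                 flag = True
--                 break
--         if not flag:
--             return False
--
--     return True
-- ===== SOURCE B (Python) =====
-- def magic_number(number):
--     opened = False
--     fours = 0
--     for c in number:
--         if c == '1':
--             opened = True
--             fours = 0
--         elif c == '4':
--             if not opened or fours == 2: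
--                 return False
--             fours += 1
--         else:
--             return False
--     return True
-- ===== Notes on version B (the rewrite author's own statement) =====
-- stated objective: alternative
-- what changed: Replaced the greedy substring-matching loop over the token list 144/14/1 by a single character-by-character finite-state scan keeping an open-1 flag and a 0..2 counter of fours.
import Mathlib
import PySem

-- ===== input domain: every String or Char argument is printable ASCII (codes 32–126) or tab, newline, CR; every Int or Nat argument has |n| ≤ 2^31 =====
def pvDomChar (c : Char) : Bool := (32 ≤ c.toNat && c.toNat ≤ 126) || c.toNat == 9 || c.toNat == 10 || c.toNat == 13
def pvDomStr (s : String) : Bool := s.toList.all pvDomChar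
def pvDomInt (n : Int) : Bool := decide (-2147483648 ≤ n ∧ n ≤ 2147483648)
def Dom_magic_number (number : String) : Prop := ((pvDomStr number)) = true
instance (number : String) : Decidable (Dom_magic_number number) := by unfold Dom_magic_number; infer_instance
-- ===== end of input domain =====

-- B replaces A's greedy token-matching over ["144","14","1"] by a single character-level
-- finite-state scan (flag "a 1 is open" + counter of trailing 4s); objective: alternative.


-- ===== PORT A =====
-- A's while loop over index i; number[i:i+len(p)] == p is ported as "take (len p) of the
-- remaining characters equals p.toList" on the suffix from i (exact for 0 ≤ i ≤ len).
def magicA_loop (cs : List Char) : Bool :=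
  if cs = [] then true
  else if cs.take 3 = ['1', '4', '4'] then magicA_loop (cs.drop 3)
  else if cs.take 2 = ['1', '4'] then magicA_loop (cs.drop 2)
  else if cs.take 1 = ['1'] then magicA_loop (cs.drop 1)
  else false
termination_by cs.length
decreasing_by
  all_goals cases cs with
  | nil => simp_all
  | cons a t => simp

def magic_number (number : String) : Bool := magicA_loop number.toList

-- ===== PORT B =====
-- the for loop of Source B: state (opened, fours), early return False ported as result false
def magicB_loop (cs : List Char) (opened : Bool) (fours : Int) : Bool :=
  match cs with
  | [] => true
  | c :: rest =>
    if c = '1' then magicB_loop rest true 0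
    else if c = '4' then
      if !opened || fours = 2 then false
      else magicB_loop rest opened (fours + 1)
    else false

def magic_number_alt (number : String) : Bool := magicB_loop number.toList false 0

-- ===== PRECONDITION & SPEC =====
def Spec_magic_number (number : String) (out : Bool) : Prop := out = magic_number_alt number
instance (number : String) (out : Bool) : Decidable (Spec_magic_number number out) := by unfold Spec_magic_number; infer_instance

-- ===== CLAIM (what is proved, stated in full; the proofs are below) =====
def Claim_equal_magic_number : Prop := ∀ (number : String), Dom_magic_number number → Spec_magic_number number (magic_number number)

-- ===== LEMMAS AND PROOFS =====

-- one-step unfolding of A's loop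
theorem magicA_nil : magicA_loop [] = true := by
  rw [magicA_loop]; rfl

theorem magicA_step (cs : List Char) :
    magicA_loop cs =
      (if cs = [] then true
       else if cs.take 3 = ['1', '4', '4'] then magicA_loop (cs.drop 3)
       else if cs.take 2 = ['1', '4'] then magicA_loop (cs.drop 2)
       else if cs.take 1 = ['1'] then magicA_loop (cs.drop 1)
       else false) := by
  rw [magicA_loop]

-- the FSM states (true, 2) and (false, 0) accept the same suffixes: in both, only '1' may come next
theorem magicB_two_eq_closed (cs : List Char) :
    magicB_loop cs true 2 = magicB_loop cs false 0 := by
  cases cs with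
  | nil => rfl
  | cons c rest =>
    by_cases h1 : c = '1' <;> by_cases h4 : c = '4' <;>
      simp [magicB_loop, h1, h4]

-- if the next character is not '4', the flag and counter are irrelevant
theorem magicB_noFour (cs : List Char) (o : Bool) (k : Int)
    (h : ∀ e t, cs = e :: t → e ≠ '4') :
    magicB_loop cs o k = magicB_loop cs false 0 := by
  cases cs with
  | nil => rfl
  | cons c rest =>
    have hc4 : c ≠ '4' := h c rest rfl
    by_cases h1 : c = '1' <;> simp [magicB_loop, h1, hc4]

theorem magic_loops_eq : ∀ (n : ℕ) (cs : List Char), cs.length ≤ n →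
    magicA_loop cs = magicB_loop cs false 0 := by
  intro n
  induction n with
  | zero =>
    intro cs h
    have : cs = [] := List.eq_nil_of_length_eq_zero (Nat.le_zero.mp h)
    subst this; exact magicA_nil
  | succ n ih =>
    intro cs hlen
    cases cs with
    | nil => exact magicA_nil
    | cons c r =>
      by_cases hc1 : c = '1'
      · subst hc1
        cases r with
        | nil => rw [magicA_step]; simp [magicA_nil, magicB_loop]
        | cons d r' =>
          by_cases hd4 : d = '4'
          · subst hd4
            cases r' with
            | nil => rw [magicA_step]; simp [magicA_nil, magicB_loop]
            | cons e r'' =>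
              by_cases he4 : e = '4'
              · subst he4
                rw [magicA_step]
                rw [if_neg (by simp), if_pos (by simp)]
                have hB : magicB_loop ('1' :: '4' :: '4' :: r'') false 0
                    = magicB_loop r'' true 2 := by
                  simp [magicB_loop]
                rw [hB, magicB_two_eq_closed]
                simp only [List.drop]
                exact ih r'' (by simp at hlen ⊢; omega)
              · -- A matches "14", B is in state (true, 1) facing e ≠ '4'
                rw [magicA_step]
                rw [if_neg (by simp), if_neg (by simp [he4]), if_pos (by simp)]
                have hB : magicB_loop ('1' :: '4' :: e :: r'') false 0
                    = magicB_loop (e :: r'') true 1 := by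
                  simp [magicB_loop]
                rw [hB, magicB_noFour (e :: r'') true 1
                  (by intro a t h; injection h with h1 _; rw [← h1]; exact he4)]
                simp only [List.drop]
                exact ih (e :: r'') (by simp at hlen ⊢; omega)
          · -- A matches "1", B moves to (true, 0) facing d ≠ '4'
            rw [magicA_step]
            rw [if_neg (by simp), if_neg (by simp [hd4]), if_neg (by simp [hd4]),
              if_pos (by simp)]
            have hB : magicB_loop ('1' :: d :: r') false 0
                = magicB_loop (d :: r') true 0 := by
              simp [magicB_loop]
            rw [hB, magicB_noFour (d :: r') true 0
              (by intro a t h; injection h with h1 _; rw [← h1]; exact hd4)]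
            simp only [List.drop]
            exact ih (d :: r') (by simp at hlen ⊢; omega)
      · by_cases hc4 : c = '4'
        · subst hc4
          rw [magicA_step]
          simp [magicB_loop]
        · rw [magicA_step]
          simp [magicB_loop, hc1, hc4]

-- ===== VERDICT (by name: the statement is the Claim_ definition above) =====
theorem magic_number_spec : Claim_equal_magic_number := by
  intro number _
  unfold Spec_magic_number magic_number magic_number_alt
  exact magic_loops_eq number.toList.length number.toList le_rfl
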